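-- pv_equiv track=rewrite | github.com/andrew-nks/IS111-Intro-to-Prog-Python- | Week 4 Strings and for loops/lab4_solutions/lab4_solutions/q4.py | encrypt_msg2
-- ===== SOURCE A (Python) =====
-- def encrypt_msg2(orig_msg):
--
--     encrypted_msg = ''
--
--     for i in range(len(orig_msg)-1, -1, -1):
--         ch = orig_msg[i]
--         if (ch == 'a'):
--             encrypted_msg = encrypted_msg + 'e'
--         elif (ch == 'e'):
--             encrypted_msg = encrypted_msg + 'i'
--         elif (ch == 'i'):
--             encrypted_msg = encrypted_msg + 'o'
--         elif (ch == 'o'):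
--             encrypted_msg = encrypted_msg + 'u'
--         elif (ch == 'u'):
--             encrypted_msg = encrypted_msg + 'a'
--         else:
--             encrypted_msg = encrypted_msg + ch
--     return encrypted_msg
-- ===== SOURCE B (Python) =====
-- def encrypt_msg2(orig_msg):
--     # Map all vowels forward in one whole-string pass, then reverse with slicing.
--     table = str.maketrans('aeiou', 'eioua')
--     return orig_msg.translate(table)[::-1]
-- ===== Notes on version B (the rewrite author's own statement) =====
-- stated objective: faster
-- what changed: Replaced the backward character-by-character loop that appends a mapped character each step with two whole-string library operations: a translation table (str.maketrans/str.translate) applied in one forward pass, then slice reversal [::-1]; this avoids per-character string concatenation and runs at C speed.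
import Mathlib
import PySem

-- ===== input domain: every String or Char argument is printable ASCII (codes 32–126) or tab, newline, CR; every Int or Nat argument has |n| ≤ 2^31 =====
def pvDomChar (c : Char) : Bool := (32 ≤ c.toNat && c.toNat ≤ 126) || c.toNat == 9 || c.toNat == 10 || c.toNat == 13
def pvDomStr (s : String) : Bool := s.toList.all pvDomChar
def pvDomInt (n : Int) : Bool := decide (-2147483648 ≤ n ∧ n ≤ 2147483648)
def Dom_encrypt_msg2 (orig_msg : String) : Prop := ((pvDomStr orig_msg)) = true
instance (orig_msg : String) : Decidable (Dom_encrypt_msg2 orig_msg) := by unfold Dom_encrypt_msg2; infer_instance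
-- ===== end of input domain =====

-- B replaces A's backward char-by-char loop with a translation-table map over the whole
-- string followed by slice reversal (idiomatic decomposition; same exact result).


-- ===== PORT A =====
-- for i in range(len(orig_msg)-1, -1, -1): ch = orig_msg[i]; if/elif chain; acc = acc + mapped
def encrypt_msg2 (orig_msg : String) : String :=
  let cs := orig_msg.toList
  String.ofList <|
    (PySem.List.pyRange ((cs.length : Int) - 1) (-1) (-1)).foldl
      (fun acc i =>
        let ch := PySem.List.pyGetD cs i ' '  -- index always in range on this loop
        if ch = 'a' then acc ++ ['e']
        else if ch = 'e' then acc ++ ['i']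
        else if ch = 'i' then acc ++ ['o']
        else if ch = 'o' then acc ++ ['u']
        else if ch = 'u' then acc ++ ['a']
        else acc ++ [ch]) []

-- ===== PORT B =====
-- table = str.maketrans('aeiou', 'eioua')  (a char→char mapping)
def pvTable : PySem.Dict Char Char :=
  PySem.Dict.ofList [('a', 'e'), ('e', 'i'), ('i', 'o'), ('o', 'u'), ('u', 'a')]

-- return orig_msg.translate(table)[::-1]
def encrypt_msg2_alt (orig_msg : String) : String :=
  String.ofList ((orig_msg.toList.map (fun c => PySem.Dict.getD pvTable c c)).reverse)

-- ===== PRECONDITION & SPEC =====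
def Spec_encrypt_msg2 (orig_msg : String) (out : String) : Prop := out = encrypt_msg2_alt orig_msg
instance (orig_msg : String) (out : String) : Decidable (Spec_encrypt_msg2 orig_msg out) := by unfold Spec_encrypt_msg2; infer_instance

-- ===== CLAIM (what is proved, stated in full; the proofs are below) =====
def Claim_equal_encrypt_msg2 : Prop := ∀ (orig_msg : String), Dom_encrypt_msg2 orig_msg → Spec_encrypt_msg2 orig_msg (encrypt_msg2 orig_msg)

-- ===== LEMMAS AND PROOFS =====

-- A's if/elif chain computes the same character as B's table lookup.
theorem pv_branch_eq_table (c : Char) :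
    (if c = 'a' then 'e'
     else if c = 'e' then 'i'
     else if c = 'i' then 'o'
     else if c = 'o' then 'u'
     else if c = 'u' then 'a'
     else c) = PySem.Dict.getD pvTable c c := by
  by_cases h1 : c = 'a'
  · subst h1; decide
  by_cases h2 : c = 'e'
  · subst h2; decide
  by_cases h3 : c = 'i'
  · subst h3; decide
  by_cases h4 : c = 'o'
  · subst h4; decide
  by_cases h5 : c = 'u'
  · subst h5; decide
  have htab : pvTable
      = PySem.Dict.mk [('a', 'e'), ('e', 'i'), ('i', 'o'), ('o', 'u'), ('u', 'a')] := by decide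
  simp [htab, PySem.Dict.getD, PySem.Dict.get?, h1, h2, h3, h4, h5,
        Ne.symm h1, Ne.symm h2, Ne.symm h3, Ne.symm h4, Ne.symm h5]

theorem pv_foldl_rev (cs : List Char) (init : List Char) :
    (PySem.List.pyRange ((cs.length : Int) - 1) (-1) (-1)).foldl
      (fun acc i =>
        let ch := PySem.List.pyGetD cs i ' '
        if ch = 'a' then acc ++ ['e']
        else if ch = 'e' then acc ++ ['i']
        else if ch = 'i' then acc ++ ['o']
        else if ch = 'o' then acc ++ ['u']
        else if ch = 'u' then acc ++ ['a']
        else acc ++ [ch]) init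
    = init ++ (cs.map (fun c => PySem.Dict.getD pvTable c c)).reverse := by
  have hfun : (fun (acc : List Char) (i : Int) =>
        let ch := PySem.List.pyGetD cs i ' '
        if ch = 'a' then acc ++ ['e']
        else if ch = 'e' then acc ++ ['i']
        else if ch = 'i' then acc ++ ['o']
        else if ch = 'o' then acc ++ ['u']
        else if ch = 'u' then acc ++ ['a']
        else acc ++ [ch])
      = fun acc i => acc ++
          [PySem.Dict.getD pvTable (PySem.List.pyGetD cs i ' ') (PySem.List.pyGetD cs i ' ')] := by
    funext acc i
    rw [← pv_branch_eq_table]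
    simp only
    split_ifs <;> rfl
  have hrng : PySem.List.pyRange ((cs.length : Int) - 1) (-1) (-1)
      = (PySem.List.pyRange 0 (cs.length : Int) 1).reverse := by
    have := PySem.List.pyRange_neg_one_eq_reverse ((cs.length : Int) - 1) (-1)
    simpa using this
  rw [hfun, PySem.List.foldl_append_singleton_eq_map, hrng, List.map_reverse]
  have hmap : (PySem.List.pyRange 0 (cs.length : Int) 1).map
        (fun i => PySem.Dict.getD pvTable (PySem.List.pyGetD cs i ' ') (PySem.List.pyGetD cs i ' '))
      = cs.map (fun c => PySem.Dict.getD pvTable c c) := by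
    calc (PySem.List.pyRange 0 (cs.length : Int) 1).map
            (fun i => PySem.Dict.getD pvTable (PySem.List.pyGetD cs i ' ') (PySem.List.pyGetD cs i ' '))
        = ((PySem.List.pyRange 0 (cs.length : Int) 1).map
            (fun i => PySem.List.pyGetD cs i ' ')).map (fun c => PySem.Dict.getD pvTable c c) := by
          rw [List.map_map]; rfl
      _ = cs.map (fun c => PySem.Dict.getD pvTable c c) := by
          rw [PySem.List.map_pyGetD_pyRange_zero']
  rw [hmap]

theorem encrypt_msg2_spec : Claim_equal_encrypt_msg2 := by
  intro s _
  unfold Spec_encrypt_msg2 encrypt_msg2 encrypt_msg2_alt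
  simp only
  rw [pv_foldl_rev]
  simp
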